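-- pv_equiv track=rewrite | github.com/pclucas14/SWE-agent | run_script/trajectory_sanity_check_analysis.py | _is_system_message
-- ===== SOURCE A (Python) =====
-- def _is_system_message(message: dict) -> str:
--     """Check if message is a system message and return the type (improved from inference script)"""
--     if not message:
--         return None
--
--     content = message.get('content', '').strip().lower()
--     thought = message.get('thought', '').strip().lower()
--
--     # Check for system message patterns
--     if any(pattern in content or pattern in thought for pattern in [
--         'reached maximum steps limit of 75',
--         'maximum steps limit of 75 reached'
--     ]):
--         return 'max_step_limit'
--
--     if any(pattern in content or pattern in thought for pattern in [
--         'exit due to context window',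
--         'context window exceeded',
--         'context limit reached'
--     ]):
--         return 'context_window_limit'
--
--     if any(pattern in content or pattern in thought for pattern in [
--         'exit due to total execution time exceeded',
--         'total execution time exceeded',
--         'execution time limit reached'
--     ]):
--         return 'execution_time_limit'
--
--     if any(pattern in content or pattern in thought for pattern in [
--         'exit due to multiple consecutive command timeouts',
--         'multiple consecutive command timeouts',
--         'command timeout limit reached'
--     ]):
--         return 'command_timeout_limit'
--
--     return None
-- ===== SOURCE B (Python) =====
-- _PATTERNS = [
--     ('reached maximum steps limit of 75', 0),
--     ('maximum steps limit of 75 reached', 0),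
--     ('exit due to context window', 1),
--     ('context window exceeded', 1),
--     ('context limit reached', 1),
--     ('exit due to total execution time exceeded', 2),
--     ('total execution time exceeded', 2),
--     ('execution time limit reached', 2),
--     ('exit due to multiple consecutive command timeouts', 3),
--     ('multiple consecutive command timeouts', 3),
--     ('command timeout limit reached', 3),
-- ]
--
-- _LABELS = ['max_step_limit', 'context_window_limit',
--            'execution_time_limit', 'command_timeout_limit']
--
--
-- def _first_group(text):
--     """Priority (group index) of the earliest matching pattern in one text."""
--     return next((g for p, g in _PATTERNS if p in text), len(_LABELS))
--
--
-- def _is_system_message(message: dict) -> str: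
--     if not message:
--         return None
--     content = message.get('content', '').strip().lower()
--     thought = message.get('thought', '').strip().lower()
--     g = min(_first_group(content), _first_group(thought))
--     return _LABELS[g] if g < len(_LABELS) else None
-- ===== Notes on version B (the rewrite author's own statement) =====
-- stated objective: alternative
-- what changed: Replaced the four sequential any-over-group cascades on the disjunction (content or thought) by a flat priority-indexed pattern list: each text is independently classified to the index of its earliest matching pattern group, the two indices are merged with min, and the label is looked up in a table.
import Mathlib
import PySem

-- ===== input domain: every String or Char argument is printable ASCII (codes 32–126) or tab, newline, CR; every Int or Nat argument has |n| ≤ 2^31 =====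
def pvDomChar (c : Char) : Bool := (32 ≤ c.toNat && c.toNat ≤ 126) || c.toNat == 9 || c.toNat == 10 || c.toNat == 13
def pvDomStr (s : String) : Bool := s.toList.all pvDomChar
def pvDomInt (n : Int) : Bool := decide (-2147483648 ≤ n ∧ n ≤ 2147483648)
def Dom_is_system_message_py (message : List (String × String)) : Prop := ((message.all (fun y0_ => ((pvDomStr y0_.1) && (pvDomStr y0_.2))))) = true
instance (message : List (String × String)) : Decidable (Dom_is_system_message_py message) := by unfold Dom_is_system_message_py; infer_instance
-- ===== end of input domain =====

-- B classifies content and thought independently to the priority index of the earliest matching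
-- pattern in a flat list, merges the two by min and looks the label up in a table, instead of
-- A's four sequential any-over-group checks on the disjunction (objective: alternative).

-- ===== PORT A =====
def is_system_message_py (message : List (String × String)) : Option String :=
  if message.isEmpty then none
  else
    let content := PySem.Str.lower (PySem.Str.strip ((PySem.Dict.ofList message).getD "content" ""))
    let thought := PySem.Str.lower (PySem.Str.strip ((PySem.Dict.ofList message).getD "thought" ""))
    if ["reached maximum steps limit of 75",
        "maximum steps limit of 75 reached"].any
         (fun pattern => PySem.Str.isIn pattern content || PySem.Str.isIn pattern thought) then
      some "max_step_limit"
    else if ["exit due to context window",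
             "context window exceeded",
             "context limit reached"].any
         (fun pattern => PySem.Str.isIn pattern content || PySem.Str.isIn pattern thought) then
      some "context_window_limit"
    else if ["exit due to total execution time exceeded",
             "total execution time exceeded",
             "execution time limit reached"].any
         (fun pattern => PySem.Str.isIn pattern content || PySem.Str.isIn pattern thought) then
      some "execution_time_limit"
    else if ["exit due to multiple consecutive command timeouts",
             "multiple consecutive command timeouts",
             "command timeout limit reached"].any
         (fun pattern => PySem.Str.isIn pattern content || PySem.Str.isIn pattern thought) then
      some "command_timeout_limit"
    else
      none

-- ===== PORT B =====
def pvPatterns : List (String × Nat) :=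
  [("reached maximum steps limit of 75", 0),
   ("maximum steps limit of 75 reached", 0),
   ("exit due to context window", 1),
   ("context window exceeded", 1),
   ("context limit reached", 1),
   ("exit due to total execution time exceeded", 2),
   ("total execution time exceeded", 2),
   ("execution time limit reached", 2),
   ("exit due to multiple consecutive command timeouts", 3),
   ("multiple consecutive command timeouts", 3),
   ("command timeout limit reached", 3)]

def pvLabels : List String :=
  ["max_step_limit", "context_window_limit", "execution_time_limit", "command_timeout_limit"]

-- priority (group index) of the earliest matching pattern in one text
def pvFirstGroup (text : String) : Nat :=
  (pvPatterns.findSome? (fun pg =>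
      if PySem.Str.isIn pg.1 text then some pg.2 else none)).getD pvLabels.length

def is_system_message_py_alt (message : List (String × String)) : Option String :=
  if message.isEmpty then none
  else
    let content := PySem.Str.lower (PySem.Str.strip ((PySem.Dict.ofList message).getD "content" ""))
    let thought := PySem.Str.lower (PySem.Str.strip ((PySem.Dict.ofList message).getD "thought" ""))
    let g := min (pvFirstGroup content) (pvFirstGroup thought)
    if g < pvLabels.length then pvLabels[g]? else none

-- ===== PRECONDITION & SPEC =====
-- Pre_ excludes association lists in which the key "content" or the key "thought" occurs more than
-- once: the argument encodes a Python dict, whose keys are distinct, so such lists represent no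
-- actual input of A (no input A returns on is excluded).
def Pre_is_system_message_py (message : List (String × String)) : Prop :=
  (message.filter (fun p => p.1 == "content")).length ≤ 1 ∧
  (message.filter (fun p => p.1 == "thought")).length ≤ 1
instance (message : List (String × String)) : Decidable (Pre_is_system_message_py message) := by unfold Pre_is_system_message_py; infer_instance
def pvWitness_is_system_message_py : (List (String × String)) := [("content", "context limit reached")]

def Spec_is_system_message_py (message : List (String × String)) (out : Option String) : Prop := out = is_system_message_py_alt message
instance (message : List (String × String)) (out : Option String) : Decidable (Spec_is_system_message_py message out) := by unfold Spec_is_system_message_py; infer_instance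

-- ===== CLAIM (what is proved, stated in full; the proofs are below) =====
def Claim_equal_is_system_message_py : Prop := ∀ (message : List (String × String)), Dom_is_system_message_py message → Pre_is_system_message_py message → Spec_is_system_message_py message (is_system_message_py message)

-- ===== LEMMAS AND PROOFS =====

-- pvFirstGroup computed at group granularity
theorem fg_char (t : String) :
    pvFirstGroup t =
      (if (PySem.Str.isIn "reached maximum steps limit of 75" t
            || PySem.Str.isIn "maximum steps limit of 75 reached" t) then (0 : Nat)
       else if (PySem.Str.isIn "exit due to context window" t
            || PySem.Str.isIn "context window exceeded" t
            || PySem.Str.isIn "context limit reached" t) then 1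
       else if (PySem.Str.isIn "exit due to total execution time exceeded" t
            || PySem.Str.isIn "total execution time exceeded" t
            || PySem.Str.isIn "execution time limit reached" t) then 2
       else if (PySem.Str.isIn "exit due to multiple consecutive command timeouts" t
            || PySem.Str.isIn "multiple consecutive command timeouts" t
            || PySem.Str.isIn "command timeout limit reached" t) then 3
       else 4) := by
  unfold pvFirstGroup pvPatterns pvLabels
  simp only [List.findSome?_cons, List.findSome?_nil]
  generalize PySem.Str.isIn "reached maximum steps limit of 75" t = b1
  generalize PySem.Str.isIn "maximum steps limit of 75 reached" t = b2
  generalize PySem.Str.isIn "exit due to context window" t = b3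
  generalize PySem.Str.isIn "context window exceeded" t = b4
  generalize PySem.Str.isIn "context limit reached" t = b5
  generalize PySem.Str.isIn "exit due to total execution time exceeded" t = b6
  generalize PySem.Str.isIn "total execution time exceeded" t = b7
  generalize PySem.Str.isIn "execution time limit reached" t = b8
  generalize PySem.Str.isIn "exit due to multiple consecutive command timeouts" t = b9
  generalize PySem.Str.isIn "multiple consecutive command timeouts" t = b10
  generalize PySem.Str.isIn "command timeout limit reached" t = b11
  revert b1 b2 b3 b4 b5 b6 b7 b8 b9 b10 b11
  decide

theorem orswap2 (a b c d : Bool) : ((a || b) || (c || d)) = ((a || c) || (b || d)) := by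
  cases a <;> cases b <;> cases c <;> cases d <;> rfl

theorem orswap3 (a b c d e f : Bool) :
    ((a || b) || ((c || d) || (e || f))) = ((a || c || e) || (b || d || f)) := by
  cases a <;> cases b <;> cases c <;> cases d <;> cases e <;> cases f <;> rfl

theorem chain_eq (C1 T1 C2 T2 C3 T3 C4 T4 : Bool) :
    (if (C1 || T1) then some "max_step_limit"
     else if (C2 || T2) then some "context_window_limit"
     else if (C3 || T3) then some "execution_time_limit"
     else if (C4 || T4) then some "command_timeout_limit"
     else none)
    = (if min (if C1 then (0 : Nat) else if C2 then 1 else if C3 then 2 else if C4 then 3 else 4)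
              (if T1 then (0 : Nat) else if T2 then 1 else if T3 then 2 else if T4 then 3 else 4)
          < pvLabels.length
       then pvLabels[min (if C1 then (0 : Nat) else if C2 then 1 else if C3 then 2 else if C4 then 3 else 4)
              (if T1 then (0 : Nat) else if T2 then 1 else if T3 then 2 else if T4 then 3 else 4)]?
       else none) := by
  revert C1 T1 C2 T2 C3 T3 C4 T4
  decide

-- ===== VERDICT (by name: the statement is the Claim_ definition above) =====
theorem is_system_message_py_spec : Claim_equal_is_system_message_py := by
  intro message _ _
  unfold Spec_is_system_message_py is_system_message_py is_system_message_py_alt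
  split
  · rfl
  · simp only [fg_char, List.any_cons, List.any_nil, Bool.or_false]
    rw [orswap2, orswap3, orswap3, orswap3]
    exact chain_eq _ _ _ _ _ _ _ _
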